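-- pv_equiv track=rewrite | github.com/TJenciR/LumenTP | lumentp/src/lumentp/server.py | _media_type_matches
-- ===== SOURCE A (Python) =====
-- def _media_type_matches(accept_header: str | None, content_type: str) -> bool:
--     if not accept_header:
--         return True
--     available = _base_media_type(content_type)
--     for item in accept_header.split(","):
--         pattern = _base_media_type(item.strip())
--         if not pattern:
--             continue
--         if pattern == "*/*":
--             return True
--         if pattern.endswith("/*"):
--             if available.startswith(pattern[:-1]):
--                 return True
--         elif pattern == available:
--             return True
--     return False
--
-- def _base_media_type(value: str) -> str:
--     return value.split(";", 1)[0].strip().lower()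
-- ===== SOURCE B (Python) =====
-- def _base(value):
--     return value.split(";", 1)[0].strip().lower()
--
--
-- def _media_type_matches(accept_header, content_type):
--     if not accept_header:
--         return True
--     available = _base(content_type)
--     targets = {"*/*", available}
--     prefix = ""
--     for ch in available:
--         if ch == "/":
--             targets.add(prefix + "/*")
--         prefix += ch
--     for item in accept_header.split(","):
--         pattern = _base(item.strip())
--         if pattern and pattern in targets:
--             return True
--     return False
-- ===== Notes on version B (the rewrite author's own statement) =====
-- stated objective: alternative
-- what changed: B precomputes once a set of all acceptable normalized patterns (*/*, the exact type, and one type/* entry per slash prefix of the available type) and reduces the per-pattern three-branch prefix/suffix cascade to a single set-membership test.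
import Mathlib
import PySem

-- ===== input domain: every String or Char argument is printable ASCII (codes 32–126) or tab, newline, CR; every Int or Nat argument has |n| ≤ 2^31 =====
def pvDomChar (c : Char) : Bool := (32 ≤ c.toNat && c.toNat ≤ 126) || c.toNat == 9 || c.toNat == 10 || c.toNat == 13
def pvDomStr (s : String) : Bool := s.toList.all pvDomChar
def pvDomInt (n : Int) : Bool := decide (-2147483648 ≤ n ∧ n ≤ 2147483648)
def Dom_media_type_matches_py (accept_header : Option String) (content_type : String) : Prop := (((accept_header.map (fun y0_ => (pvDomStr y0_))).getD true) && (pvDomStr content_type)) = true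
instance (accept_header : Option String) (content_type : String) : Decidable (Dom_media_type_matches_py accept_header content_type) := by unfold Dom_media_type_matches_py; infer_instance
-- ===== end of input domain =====

-- B replaces A's per-pattern branch cascade by one membership test in a precomputed set of acceptable patterns (alternative decomposition, same cost class).

-- ===== PORT A =====
-- _base_media_type(value) = value.split(";", 1)[0].strip().lower()
def pvBase (v : List Char) : List Char :=
  PySem.Chars.lower (PySem.Chars.strip ((PySem.Chars.splitOnMax v [';'] 1).headD []))

-- A's loop over accept_header.split(","), with early return
def pvLoopA (available : List Char) : List (List Char) → Bool
  | [] => false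
  | item :: rest =>
    let pattern := pvBase (PySem.Chars.strip item)
    if pattern = [] then pvLoopA available rest
    else if pattern = ['*', '/', '*'] then true
    else if PySem.Chars.endswith pattern ['/', '*'] then
      if PySem.Chars.startswith available (PySem.Chars.slice pattern none (some (-1))) then true
      else pvLoopA available rest
    else if pattern = available then true
    else pvLoopA available rest

def media_type_matches_py (accept_header : Option String) (content_type : String) : Bool :=
  match accept_header with
  | none => true
  | some ah =>
    if ah.toList = [] then true
    else pvLoopA (pvBase content_type.toList) (PySem.Chars.splitOn ah.toList [','])

-- ===== PORT B =====
-- B's target-building loop: for ch in available: if ch == "/": targets.add(prefix + "/*"); prefix += ch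
def pvWild : List Char → List Char → PySem.Set (List Char) → PySem.Set (List Char)
  | [], _, s => s
  | c :: cs, pref, s =>
    pvWild cs (pref ++ [c]) (if c = '/' then PySem.Set.add s (pref ++ ['/', '*']) else s)

-- B's loop: if pattern and pattern in targets: return True
def pvLoopB (targets : PySem.Set (List Char)) : List (List Char) → Bool
  | [] => false
  | item :: rest =>
    let pattern := pvBase (PySem.Chars.strip item)
    if !pattern.isEmpty && PySem.Set.contains targets pattern then true
    else pvLoopB targets rest

def media_type_matches_py_alt (accept_header : Option String) (content_type : String) : Bool :=
  match accept_header with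
  | none => true
  | some ah =>
    if ah.toList = [] then true
    else
      let available := pvBase content_type.toList
      let targets := pvWild available [] (PySem.Set.ofList [['*', '/', '*'], available])
      pvLoopB targets (PySem.Chars.splitOn ah.toList [','])

-- ===== PRECONDITION & SPEC =====
def Spec_media_type_matches_py (accept_header : Option String) (content_type : String) (out : Bool) : Prop := out = media_type_matches_py_alt accept_header content_type
instance (accept_header : Option String) (content_type : String) (out : Bool) : Decidable (Spec_media_type_matches_py accept_header content_type out) := by unfold Spec_media_type_matches_py; infer_instance

-- ===== CLAIM (what is proved, stated in full; the proofs are below) =====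
def Claim_equal_media_type_matches_py : Prop := ∀ (accept_header : Option String) (content_type : String), Dom_media_type_matches_py accept_header content_type → Spec_media_type_matches_py accept_header content_type (media_type_matches_py accept_header content_type)

-- ===== LEMMAS AND PROOFS =====

-- membership in the set built by B's wildcard loop
theorem mem_pvWild (cs : List Char) (pref : List Char) (s : PySem.Set (List Char)) (x : List Char) :
    x ∈ pvWild cs pref s ↔ x ∈ s ∨ ∃ q r, cs = q ++ '/' :: r ∧ x = pref ++ q ++ ['/', '*'] := by
  induction cs generalizing pref s with
  | nil =>
    simp only [pvWild]
    constructor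
    · exact Or.inl
    · rintro (h | ⟨q, r, hqr, _⟩)
      · exact h
      · cases q <;> simp_all
  | cons c cs ih =>
    by_cases hc : c = '/'
    · subst hc
      have hstep : pvWild ('/' :: cs) pref s
          = pvWild cs (pref ++ ['/']) (PySem.Set.add s (pref ++ ['/', '*'])) := by
        simp [pvWild]
      rw [hstep, ih]
      simp only [PySem.Set.mem_add]
      constructor
      · rintro ((h | h) | ⟨q, r, hqr, hx⟩)
        · exact Or.inl h
        · exact Or.inr ⟨[], cs, rfl, by simpa using h⟩
        · exact Or.inr ⟨'/' :: q, r, by simp [hqr], by simp [hx]⟩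
      · rintro (h | ⟨q, r, hqr, hx⟩)
        · exact Or.inl (Or.inl h)
        · cases q with
          | nil => exact Or.inl (Or.inr (by simpa using hx))
          | cons a q =>
            rw [List.cons_append, List.cons.injEq] at hqr
            obtain ⟨ha, hcs⟩ := hqr
            subst hcs
            cases ha
            exact Or.inr ⟨q, r, rfl, by simp [hx]⟩
    · have hstep : pvWild (c :: cs) pref s = pvWild cs (pref ++ [c]) s := by
        simp [pvWild, hc]
      rw [hstep, ih]
      constructor
      · rintro (h | ⟨q, r, hqr, hx⟩)
        · exact Or.inl h
        · exact Or.inr ⟨c :: q, r, by simp [hqr], by simp [hx]⟩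
      · rintro (h | ⟨q, r, hqr, hx⟩)
        · exact Or.inl h
        · cases q with
          | nil => simp_all
          | cons a q =>
            rw [List.cons_append, List.cons.injEq] at hqr
            obtain ⟨ha, hcs⟩ := hqr
            subst hcs
            cases ha
            exact Or.inr ⟨q, r, rfl, by simp [hx]⟩

-- A's wildcard branch (endswith "/*" and available.startswith(pattern[:-1])) in closed form
theorem wild_cond (avail p : List Char) :
    (PySem.Chars.endswith p ['/', '*'] &&
      PySem.Chars.startswith avail (PySem.List.slice p none (some (-1)))) = true
    ↔ ∃ q r, avail = q ++ '/' :: r ∧ p = q ++ ['/', '*'] := by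
  rw [Bool.and_eq_true, PySem.Chars.endswith_iff, PySem.Chars.startswith_iff]
  simp only [PySem.List.slice_to_neg_one]
  constructor
  · rintro ⟨⟨t, ht⟩, hpre⟩
    subst ht
    obtain ⟨r, hr⟩ := hpre
    refine ⟨t, r, ?_, rfl⟩
    simpa using hr.symm
  · rintro ⟨q, r, ha, hp⟩
    subst hp
    refine ⟨⟨q, rfl⟩, ⟨r, ?_⟩⟩
    simpa using ha.symm

-- membership in B's full target set
theorem mem_targets (avail p : List Char) :
    p ∈ pvWild avail [] (PySem.Set.ofList [['*', '/', '*'], avail])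
    ↔ p = ['*', '/', '*'] ∨ p = avail ∨ ∃ q r, avail = q ++ '/' :: r ∧ p = q ++ ['/', '*'] := by
  rw [mem_pvWild]
  simp only [PySem.Set.mem_ofList, List.mem_cons, List.not_mem_nil, or_false, List.nil_append]
  tauto

-- the two loops agree
theorem loop_eq (avail : List Char) (items : List (List Char)) :
    pvLoopA avail items =
      pvLoopB (pvWild avail [] (PySem.Set.ofList [['*', '/', '*'], avail])) items := by
  induction items with
  | nil => rfl
  | cons item rest ih =>
    simp only [pvLoopA, pvLoopB]
    rw [ih]
    generalize pvBase (PySem.Chars.strip item) = p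
    by_cases h0 : p = []
    · subst h0
      simp
    by_cases h1 : p = ['*', '/', '*']
    · subst h1
      have hc := (mem_targets avail ['*', '/', '*']).mpr (Or.inl rfl)
      simp [hc]
    by_cases h2 : PySem.Chars.endswith p ['/', '*'] = true
    · by_cases h3 : PySem.Chars.startswith avail (PySem.List.slice p none (some (-1))) = true
      · have hw : ∃ q r, avail = q ++ '/' :: r ∧ p = q ++ ['/', '*'] :=
          (wild_cond avail p).mp (by simp [h2, h3])
        have hc := (mem_targets avail p).mpr (Or.inr (Or.inr hw))
        simp [h0, h1, h2, h3, hc]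
      · -- A falls through; B's membership is false here
        have hcf : p ∉ pvWild avail [] (PySem.Set.ofList [['*', '/', '*'], avail]) := by
          intro hcont
          rcases (mem_targets avail p).mp hcont with h | h | hw
          · exact h1 h
          · -- p = avail and p ends with "/*" would force the startswith test to succeed
            obtain ⟨t, ht⟩ := (PySem.Chars.endswith_iff p ['/', '*']).mp h2
            exact h3 ((Bool.and_eq_true _ _).mp
              ((wild_cond avail p).mpr ⟨t, ['*'], by rw [← h, ← ht], ht.symm⟩)).2
          · exact h3 ((Bool.and_eq_true _ _).mp ((wild_cond avail p).mpr hw)).2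
        simp [h0, h1, h2, h3, hcf]
    by_cases h4 : p = avail
    · subst h4
      have hc := (mem_targets p p).mpr (Or.inr (Or.inl rfl))
      simp [h0, h1, h2, hc]
    · have hcf : p ∉ pvWild avail [] (PySem.Set.ofList [['*', '/', '*'], avail]) := by
        intro hcont
        rcases (mem_targets avail p).mp hcont with h | h | hw
        · exact h1 h
        · exact h4 h
        · exact h2 ((Bool.and_eq_true _ _).mp ((wild_cond avail p).mpr hw)).1
      simp [h0, h1, h2, h4, hcf]

-- ===== VERDICT (by name: the statement is the Claim_ definition above) =====
theorem media_type_matches_py_spec : Claim_equal_media_type_matches_py := by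
  intro accept_header content_type _
  unfold Spec_media_type_matches_py media_type_matches_py media_type_matches_py_alt
  match accept_header with
  | none => rfl
  | some ah =>
    by_cases h : ah.toList = []
    · simp [h]
    · simp only [if_neg h]
      exact loop_eq _ _
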